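-- pv_equiv track=rewrite | github.com/kkkangkkang-creator/window_translation | src/window_translation/ocr/paddleocr_backend.py | _pick_paddle_lang
-- ===== SOURCE A (Python) =====
-- _TESS_TO_PADDLE = {
--     "eng": "en",
--     "kor": "korean",
--     "jpn": "japan",
--     "chi_sim": "ch",
--     "chi_tra": "chinese_cht",
-- }
--
-- _PRIORITY = ["kor", "jpn", "chi_sim", "chi_tra", "eng"]
--
-- def _pick_paddle_lang(tesseract_langs: str) -> str:
--     """``"eng+jpn+chi_sim"`` 같은 Tesseract 언어 문자열에서 Paddle 언어 코드를 고른다."""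
--     parts = {p.strip().lower() for p in tesseract_langs.split("+") if p.strip()}
--     for code in _PRIORITY:
--         if code in parts:
--             return _TESS_TO_PADDLE[code]
--     # 직접 Paddle 코드를 줬을 수도 있으니 그대로 사용.
--     if tesseract_langs.strip():
--         return tesseract_langs.strip()
--     return "en"
-- ===== SOURCE B (Python) =====
-- _TESS_TO_PADDLE = {
--     "eng": "en",
--     "kor": "korean",
--     "jpn": "japan",
--     "chi_sim": "ch",
--     "chi_tra": "chinese_cht",
-- }
--
-- _RANK = {"kor": 0, "jpn": 1, "chi_sim": 2, "chi_tra": 3, "eng": 4}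
-- _PADDLE_BY_RANK = ["korean", "japan", "ch", "chinese_cht", "en"]
--
--
-- def _pick_paddle_lang(tesseract_langs: str) -> str:
--     """Single pass over the parts tracking the smallest priority rank seen."""
--     best = 5
--     for p in tesseract_langs.split("+"):
--         r = _RANK.get(p.strip().lower(), 5)
--         if r < best:
--             best = r
--     if best < 5:
--         return _PADDLE_BY_RANK[best]
--     s = tesseract_langs.strip()
--     return s if s else "en"
-- ===== Notes on version B (the rewrite author's own statement) =====
-- stated objective: alternative
-- what changed: Instead of building a set of normalized parts and scanning the fixed priority list for the first member, B makes one pass over the parts themselves tracking the minimum priority rank via a rank dict, then indexes a rank-ordered code table.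
import Mathlib
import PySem

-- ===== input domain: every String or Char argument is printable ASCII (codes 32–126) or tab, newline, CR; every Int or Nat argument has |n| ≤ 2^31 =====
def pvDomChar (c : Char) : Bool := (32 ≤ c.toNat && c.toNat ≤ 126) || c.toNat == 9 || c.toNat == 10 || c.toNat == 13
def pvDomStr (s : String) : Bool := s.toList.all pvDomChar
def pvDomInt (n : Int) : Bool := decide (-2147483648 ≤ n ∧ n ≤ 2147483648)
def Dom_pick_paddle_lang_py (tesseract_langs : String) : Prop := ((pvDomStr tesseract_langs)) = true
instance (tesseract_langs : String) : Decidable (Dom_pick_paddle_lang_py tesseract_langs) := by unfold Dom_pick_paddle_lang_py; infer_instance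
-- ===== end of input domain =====

-- B replaces A's set-of-parts + priority-list scan by a single pass over the parts
-- tracking the minimum priority rank (alternative decomposition, same cost).

-- ===== PORT A =====
def tessToPaddle : PySem.Dict String String :=
  PySem.Dict.ofList [("eng", "en"), ("kor", "korean"), ("jpn", "japan"),
                     ("chi_sim", "ch"), ("chi_tra", "chinese_cht")]

def priorityList : List String := ["kor", "jpn", "chi_sim", "chi_tra", "eng"]

-- the 'for code in _PRIORITY: if code in parts: return _TESS_TO_PADDLE[code]' loop
-- (every code scanned is a key of the dict, so the KeyError case of d[code] is unreachable;
--  getD … "" is exact there)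
def aLoop (parts : PySem.Set String) : List String → Option String
  | [] => none
  | c :: rest =>
      if PySem.Set.contains parts c then some (PySem.Dict.getD tessToPaddle c "")
      else aLoop parts rest

def pick_paddle_lang_py (tesseract_langs : String) : String :=
  -- split("+") with a nonempty separator never raises: .getD [] is exact
  let parts : PySem.Set String :=
    PySem.Set.ofList
      ((((PySem.Str.split? tesseract_langs "+").getD []).filter
          (fun p => decide (PySem.Str.strip p ≠ ""))).map
        (fun p => PySem.Str.lower (PySem.Str.strip p)))
  match aLoop parts priorityList with
  | some r => r
  | none =>
      if PySem.Str.strip tesseract_langs ≠ "" then PySem.Str.strip tesseract_langs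
      else "en"

-- ===== PORT B =====
def rankDict : PySem.Dict String Nat :=
  PySem.Dict.ofList [("kor", 0), ("jpn", 1), ("chi_sim", 2), ("chi_tra", 3), ("eng", 4)]

def paddleByRank : List String := ["korean", "japan", "ch", "chinese_cht", "en"]

-- the 'for p in tesseract_langs.split("+")' loop tracking the minimum rank
def bLoop : List String → Nat → Nat
  | [], best => best
  | p :: rest, best =>
      let r := PySem.Dict.getD rankDict (PySem.Str.lower (PySem.Str.strip p)) 5
      bLoop rest (if r < best then r else best)

def pick_paddle_lang_py_alt (tesseract_langs : String) : String :=
  let best := bLoop ((PySem.Str.split? tesseract_langs "+").getD []) 5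
  -- _PADDLE_BY_RANK[best] with best < 5 is always in range: .getD "" is exact
  if best < 5 then (PySem.List.pyGet? paddleByRank (best : Int)).getD ""
  else
    let s := PySem.Str.strip tesseract_langs
    if s ≠ "" then s else "en"

-- ===== PRECONDITION & SPEC =====
def Spec_pick_paddle_lang_py (tesseract_langs : String) (out : String) : Prop := out = pick_paddle_lang_py_alt tesseract_langs
instance (tesseract_langs : String) (out : String) : Decidable (Spec_pick_paddle_lang_py tesseract_langs out) := by unfold Spec_pick_paddle_lang_py; infer_instance

-- ===== CLAIM (what is proved, stated in full; the proofs are below) =====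
def Claim_equal_pick_paddle_lang_py : Prop := ∀ (tesseract_langs : String), Dom_pick_paddle_lang_py tesseract_langs → Spec_pick_paddle_lang_py tesseract_langs (pick_paddle_lang_py tesseract_langs)

-- ===== LEMMAS AND PROOFS =====

-- rank of the first priority code present in the normalized parts list
def specRank (l : List String) : Nat :=
  if "kor" ∈ l then 0 else if "jpn" ∈ l then 1 else if "chi_sim" ∈ l then 2
  else if "chi_tra" ∈ l then 3 else if "eng" ∈ l then 4 else 5

lemma specRank_le_five (l : List String) : specRank l ≤ 5 := by
  unfold specRank; split_ifs <;> omega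

lemma getD_rank_of_ne (q : String) (h0 : q ≠ "kor") (h1 : q ≠ "jpn") (h2 : q ≠ "chi_sim")
    (h3 : q ≠ "chi_tra") (h4 : q ≠ "eng") : PySem.Dict.getD rankDict q 5 = 5 := by
  have hmk : rankDict = PySem.Dict.mk [("kor", 0), ("jpn", 1), ("chi_sim", 2), ("chi_tra", 3), ("eng", 4)] := rfl
  rw [hmk]
  simp [PySem.Dict.getD, beq_iff_eq,
        Ne.symm h0, Ne.symm h1, Ne.symm h2, Ne.symm h3, Ne.symm h4, PySem.Dict.get?]

set_option maxHeartbeats 1000000 in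
lemma specRank_cons (q : String) (l : List String) :
    specRank (q :: l) = min (PySem.Dict.getD rankDict q 5) (specRank l) := by
  have h5 := specRank_le_five l
  by_cases h0 : q = "kor"
  · subst h0
    have : PySem.Dict.getD rankDict "kor" 5 = 0 := rfl
    simp [specRank, this]
  · by_cases h1 : q = "jpn"
    · subst h1
      have : PySem.Dict.getD rankDict "jpn" 5 = 1 := rfl
      rw [this]
      simp only [specRank, List.mem_cons]
      split_ifs <;> simp_all
    · by_cases h2 : q = "chi_sim"
      · subst h2
        have : PySem.Dict.getD rankDict "chi_sim" 5 = 2 := rfl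
        rw [this]
        simp only [specRank, List.mem_cons]
        split_ifs <;> simp_all
      · by_cases h3 : q = "chi_tra"
        · subst h3
          have : PySem.Dict.getD rankDict "chi_tra" 5 = 3 := rfl
          rw [this]
          simp only [specRank, List.mem_cons]
          split_ifs <;> simp_all
        · by_cases h4 : q = "eng"
          · subst h4
            have : PySem.Dict.getD rankDict "eng" 5 = 4 := rfl
            rw [this]
            simp only [specRank, List.mem_cons]
            split_ifs <;> simp_all
          · rw [getD_rank_of_ne q h0 h1 h2 h3 h4]
            simp only [specRank, List.mem_cons]
            split_ifs <;> simp_all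

lemma bLoop_eq (ps : List String) (b : Nat) (hb : b ≤ 5) :
    bLoop ps b = min b (specRank (ps.map (fun p => PySem.Str.lower (PySem.Str.strip p)))) := by
  induction ps generalizing b with
  | nil =>
      simp only [bLoop, List.map_nil]
      have : specRank ([] : List String) = 5 := by decide
      omega
  | cons p rest ih =>
      simp only [bLoop, List.map_cons]
      rw [specRank_cons]
      by_cases hrb : PySem.Dict.getD rankDict (PySem.Str.lower (PySem.Str.strip p)) 5 < b
      · rw [if_pos hrb, ih _ (by omega)]; omega
      · rw [if_neg hrb, ih _ hb]; omega

-- a nonempty normalized code is in the filtered-normalized list iff it is in the plain normalized list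
lemma mem_filtered (ps : List String) (c : String) (hc : c ≠ "") :
    (c ∈ (ps.filter (fun p => decide (PySem.Str.strip p ≠ ""))).map
        (fun p => PySem.Str.lower (PySem.Str.strip p))) ↔
      c ∈ ps.map (fun p => PySem.Str.lower (PySem.Str.strip p)) := by
  simp only [List.mem_map, List.mem_filter, decide_eq_true_eq]
  constructor
  · rintro ⟨p, ⟨hp, _⟩, hnorm⟩; exact ⟨p, hp, hnorm⟩
  · rintro ⟨p, hp, hnorm⟩
    refine ⟨p, ⟨hp, ?_⟩, hnorm⟩
    intro hstrip
    apply hc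
    rw [← hnorm, hstrip]
    decide

-- ===== VERDICT (by name: the statement is the Claim_ definition above) =====

theorem pick_paddle_lang_py_spec : Claim_equal_pick_paddle_lang_py := by
  intro t _
  show pick_paddle_lang_py t = pick_paddle_lang_py_alt t
  unfold pick_paddle_lang_py pick_paddle_lang_py_alt
  rw [bLoop_eq _ _ (by omega)]
  set ps : List String := (PySem.Str.split? t "+").getD [] with hps
  set L : List String := ps.map (fun p => PySem.Str.lower (PySem.Str.strip p)) with hL
  have hcont : ∀ c : String, c ≠ "" →
      PySem.Set.contains (PySem.Set.ofList
        ((ps.filter (fun p => decide (PySem.Str.strip p ≠ ""))).map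
          (fun p => PySem.Str.lower (PySem.Str.strip p)))) c = decide (c ∈ L) := by
    intro c hc
    have h1 : PySem.Set.contains (PySem.Set.ofList
        ((ps.filter (fun p => decide (PySem.Str.strip p ≠ ""))).map
          (fun p => PySem.Str.lower (PySem.Str.strip p)))) c
        = decide (c ∈ (ps.filter (fun p => decide (PySem.Str.strip p ≠ ""))).map
          (fun p => PySem.Str.lower (PySem.Str.strip p))) := by
      simp [PySem.Set.contains, PySem.Set.mem_ofList]
    rw [h1, decide_eq_decide]
    exact mem_filtered ps c hc
  simp only [aLoop, priorityList]
  rw [hcont "kor" (by decide), hcont "jpn" (by decide), hcont "chi_sim" (by decide),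
      hcont "chi_tra" (by decide), hcont "eng" (by decide)]
  have h5 := specRank_le_five L
  by_cases k0 : "kor" ∈ L
  · simp [k0, specRank]; rfl
  · by_cases k1 : "jpn" ∈ L
    · simp [k0, k1, specRank]; rfl
    · by_cases k2 : "chi_sim" ∈ L
      · simp [k0, k1, k2, specRank]; rfl
      · by_cases k3 : "chi_tra" ∈ L
        · simp [k0, k1, k2, k3, specRank]; rfl
        · by_cases k4 : "eng" ∈ L
          · simp [k0, k1, k2, k3, k4, specRank]; rfl
          · simp [k0, k1, k2, k3, k4, specRank]
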